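-- pv_equiv track=rewrite | github.com/SailfinIO/sailfin | runtime/stage2_runner.py | _escape_string_for_llvm
-- ===== SOURCE A (Python) =====
-- def _escape_string_for_llvm(value: str) -> str:
--     escaped = []
--     for ch in value:
--         if ch == "\n":
--             escaped.append("\\0A")
--         elif ch == "\r":
--             escaped.append("\\0D")
--         elif ch == "\t":
--             escaped.append("\\09")
--         elif ch == "\"":
--             escaped.append("\\22")
--         elif ch == "\\":
--             escaped.append("\\5C")
--         else:
--             escaped.append(ch)
--     return "".join(escaped)
-- ===== SOURCE B (Python) =====
-- def _escape_string_for_llvm(value: str) -> str: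
--     # Staged rewriting: escape the backslash first so the backslashes
--     # introduced by the later stages are never re-escaped; the later
--     # patterns (\n, \r, \t, ") never occur in any replacement text.
--     value = value.replace("\\", "\\5C")
--     value = value.replace("\n", "\\0A")
--     value = value.replace("\r", "\\0D")
--     value = value.replace("\t", "\\09")
--     value = value.replace("\"", "\\22")
--     return value
-- ===== Notes on version B (the rewrite author's own statement) =====
-- stated objective: simpler
-- what changed: Replaces A's single accumulating pass (if/elif ladder appending pieces to a list, then join) by five staged whole-string rewrites with str.replace, escaping the backslash first so backslashes introduced by later stages are never re-escaped.
import Mathlib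
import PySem

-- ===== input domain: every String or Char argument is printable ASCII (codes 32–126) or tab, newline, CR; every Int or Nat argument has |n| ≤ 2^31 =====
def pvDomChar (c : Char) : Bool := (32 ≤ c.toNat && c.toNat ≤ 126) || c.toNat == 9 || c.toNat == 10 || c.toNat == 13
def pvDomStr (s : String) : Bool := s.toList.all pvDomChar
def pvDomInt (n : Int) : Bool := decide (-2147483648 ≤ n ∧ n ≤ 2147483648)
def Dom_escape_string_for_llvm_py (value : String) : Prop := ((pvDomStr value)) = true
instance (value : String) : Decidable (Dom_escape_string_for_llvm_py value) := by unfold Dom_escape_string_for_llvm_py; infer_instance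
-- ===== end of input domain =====

-- B replaces A's single accumulating pass (if/elif ladder + list append + join) by five staged
-- whole-string str.replace rewrites, backslash first so later-inserted backslashes are not re-escaped (simpler).

-- ===== PORT A =====
-- literal port of A: accumulate escape pieces in a list, then "".join
def escape_string_for_llvm_py (value : String) : String :=
  PySem.Str.join ""
    (value.toList.foldl (fun escaped ch =>
      if ch = '\n' then escaped ++ ["\\0A"]
      else if ch = '\r' then escaped ++ ["\\0D"]
      else if ch = '\t' then escaped ++ ["\\09"]
      else if ch = '"' then escaped ++ ["\\22"]
      else if ch = '\\' then escaped ++ ["\\5C"]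
      else escaped ++ [String.ofList [ch]]) [])

-- ===== PORT B =====
-- port of B: five staged whole-string rewrites via str.replace, backslash escaped first
def escape_string_for_llvm_py_alt (value : String) : String :=
  PySem.Str.replace
    (PySem.Str.replace
      (PySem.Str.replace
        (PySem.Str.replace
          (PySem.Str.replace value "\\" "\\5C")
          "\n" "\\0A")
        "\r" "\\0D")
      "\t" "\\09")
    "\"" "\\22"

-- ===== PRECONDITION & SPEC =====
def Spec_escape_string_for_llvm_py (value : String) (out : String) : Prop := out = escape_string_for_llvm_py_alt value
instance (value : String) (out : String) : Decidable (Spec_escape_string_for_llvm_py value out) := by unfold Spec_escape_string_for_llvm_py; infer_instance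

-- ===== CLAIM (what is proved, stated in full; the proofs are below) =====
def Claim_equal_escape_string_for_llvm_py : Prop := ∀ (value : String), Dom_escape_string_for_llvm_py value → Spec_escape_string_for_llvm_py value (escape_string_for_llvm_py value)

-- ===== LEMMAS AND PROOFS =====

-- replace with a one-character pattern is a flatMap over the characters
theorem pv_go_single (p : Char) (new : List Char) :
    ∀ (l : List Char) (fuel : Nat) (acc : List Char), l.length ≤ fuel →
    PySem.Chars.replace.go [p] new fuel l acc
      = acc.reverse ++ l.flatMap (fun c => if c = p then new else [c]) := by
  intro l
  induction l with
  | nil =>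
    intro fuel acc _
    cases fuel <;> simp [PySem.Chars.replace.go]
  | cons c t ih =>
    intro fuel acc hle
    cases fuel with
    | zero => simp at hle
    | succ f =>
      simp only [PySem.Chars.replace.go, List.isPrefixOf, List.flatMap_cons]
      by_cases hc : p = c
      · subst hc
        simp only [beq_self_eq_true, Bool.true_and, if_true]
        rw [show List.drop [p].length (p :: t) = t from rfl,
          ih f (new.reverse ++ acc) (by simpa using hle)]
        simp
      · have : (p == c) = false := by simp [hc]
        simp only [this, Bool.false_and, if_neg Bool.false_ne_true]
        rw [ih f (c :: acc) (by simpa using hle)]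
        simp [Ne.symm hc]

theorem pv_replace_single (p : Char) (new : List Char) (l : List Char) :
    PySem.Chars.replace l [p] new = l.flatMap (fun c => if c = p then new else [c]) := by
  simp [PySem.Chars.replace, pv_go_single p new l l.length [] le_rfl]

-- A's per-character piece
def pvPieceA (ch : Char) : String :=
  if ch = '\n' then "\\0A"
  else if ch = '\r' then "\\0D"
  else if ch = '\t' then "\\09"
  else if ch = '"' then "\\22"
  else if ch = '\\' then "\\5C"
  else String.ofList [ch]

-- A's foldl builds acc ++ per-character pieces
theorem pv_foldl_eq (l : List Char) (acc : List String) :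
    (l.foldl (fun escaped ch =>
      if ch = '\n' then escaped ++ ["\\0A"]
      else if ch = '\r' then escaped ++ ["\\0D"]
      else if ch = '\t' then escaped ++ ["\\09"]
      else if ch = '"' then escaped ++ ["\\22"]
      else if ch = '\\' then escaped ++ ["\\5C"]
      else escaped ++ [String.ofList [ch]]) acc)
    = acc ++ l.map pvPieceA := by
  induction l generalizing acc with
  | nil => simp
  | cons c cs ih =>
    simp only [List.foldl_cons, List.map_cons]
    rw [ih]
    unfold pvPieceA
    split_ifs <;> simp

-- the five staged flatMaps compose, per original character, to A's piece
theorem pv_stages_eq (l : List Char) :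
    ((((l.flatMap (fun c => if c = '\\' then "\\5C".toList else [c])).flatMap
        (fun c => if c = '\n' then "\\0A".toList else [c])).flatMap
        (fun c => if c = '\r' then "\\0D".toList else [c])).flatMap
        (fun c => if c = '\t' then "\\09".toList else [c])).flatMap
        (fun c => if c = '"' then "\\22".toList else [c])
    = l.flatMap (fun c => (pvPieceA c).toList) := by
  induction l with
  | nil => rfl
  | cons c t ih =>
    simp only [List.flatMap_cons, List.flatMap_append] at *
    rw [ih]
    congr 1
    unfold pvPieceA
    by_cases h1 : c = '\n'; · subst h1; decide
    by_cases h2 : c = '\r'; · subst h2; decide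
    by_cases h3 : c = '\t'; · subst h3; decide
    by_cases h4 : c = '"';  · subst h4; decide
    by_cases h5 : c = '\\'; · subst h5; decide
    simp [h1, h2, h3, h4, h5, String.toList_ofList]

theorem pv_flatten_intersperse_nil {α : Type} (l : List (List α)) :
    (List.intersperse [] l).flatten = l.flatten := by
  induction l with
  | nil => rfl
  | cons a t ih =>
    cases t with
    | nil => rfl
    | cons b u =>
      simp only [List.intersperse, List.flatten_cons] at *
      simp [ih]

-- ===== VERDICT (by name: the statement is the Claim_ definition above) =====
theorem escape_string_for_llvm_py_spec : Claim_equal_escape_string_for_llvm_py := by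
  intro value _
  unfold Spec_escape_string_for_llvm_py
  rw [← String.toList_inj]
  unfold escape_string_for_llvm_py escape_string_for_llvm_py_alt
  rw [pv_foldl_eq]
  simp only [PySem.Str.toList_replace, PySem.Str.toList_join]
  have h1 : ("\\" : String).toList = ['\\'] := by decide
  have h2 : ("\n" : String).toList = ['\n'] := by decide
  have h3 : ("\r" : String).toList = ['\r'] := by decide
  have h4 : ("\t" : String).toList = ['\t'] := by decide
  have h5 : ("\"" : String).toList = ['"'] := by decide
  rw [h1, h2, h3, h4, h5]
  rw [pv_replace_single, pv_replace_single, pv_replace_single, pv_replace_single, pv_replace_single]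
  rw [pv_stages_eq]
  have h0 : ("" : String).toList = [] := by decide
  simp only [PySem.Chars.join, List.intercalate, List.flatMap, h0, List.nil_append,
    pv_flatten_intersperse_nil, List.map_map]
  rfl
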